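-- pv_equiv track=rewrite | github.com/zwj-3193655211/Dynamic-programming | convex_polygon_triangulation.py | solve_convex_polygon_triangulation
-- ===== SOURCE A (Python) =====
-- def solve_convex_polygon_triangulation(weights):
--     # 获取权重矩阵的长度，即顶点数
--     n = len(weights)
--     # 初始化 m 矩阵，用于存储子问题的最优解
--     m = [[0] * n for _ in range(n)]
--     # 初始化 s 矩阵，用于记录最优分割点
--     s = [[0] * n for _ in range(n)]
--
--     # l 表示子问题中多边形的边数差，即子问题规模
--     for l in range(2, n):
--         # 遍历所有可能的起始顶点
--         for i in range(n - l):
--             # 计算对应的结束顶点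
--             j = i + l
--             # 初始化 m[i][j] 为无穷大
--             m[i][j] = float('inf')
--             # 遍历所有可能的分割点
--             for k in range(i + 1, j):
--                 # 计算当前分割点下的代价
--                 q = m[i][k] + m[k][j] + weights[i][k] + weights[k][j] + weights[i][j]
--                 # 如果当前代价小于 m[i][j]，更新 m[i][j] 和 s[i][j]
--                 if q < m[i][j]:
--                     m[i][j] = q
--                     s[i][j] = k
--     # 返回 m 矩阵和 s 矩阵
--     return m, s
-- ===== SOURCE B (Python) =====
-- def solve_convex_polygon_triangulation(weights):
--     n = len(weights)
--     memo = {}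
--
--     # top-down: rec(i, j) returns (best cost, best split) for the sub-polygon i..j
--     def rec(i, j):
--         if j - i < 2:
--             return (0, 0)
--         if (i, j) not in memo:
--             best = None
--             arg = 0
--             for k in range(i + 1, j):
--                 q = rec(i, k)[0] + rec(k, j)[0] + weights[i][k] + weights[k][j] + weights[i][j]
--                 if best is None or q < best:
--                     best, arg = q, k
--             memo[(i, j)] = (best, arg)
--         return memo[(i, j)]
--
--     m = [[rec(i, j)[0] for j in range(n)] for i in range(n)]
--     s = [[rec(i, j)[1] for j in range(n)] for i in range(n)]
--     return m, s
-- ===== Notes on version B (the rewrite author's own statement) =====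
-- stated objective: alternative
-- what changed: Bottom-up length-by-length table filling is replaced by top-down memoized recursion rec(i,j) over intervals, with the two matrices built afterwards by comprehensions from the recursion/memo instead of in-place mutation.
import Mathlib
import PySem

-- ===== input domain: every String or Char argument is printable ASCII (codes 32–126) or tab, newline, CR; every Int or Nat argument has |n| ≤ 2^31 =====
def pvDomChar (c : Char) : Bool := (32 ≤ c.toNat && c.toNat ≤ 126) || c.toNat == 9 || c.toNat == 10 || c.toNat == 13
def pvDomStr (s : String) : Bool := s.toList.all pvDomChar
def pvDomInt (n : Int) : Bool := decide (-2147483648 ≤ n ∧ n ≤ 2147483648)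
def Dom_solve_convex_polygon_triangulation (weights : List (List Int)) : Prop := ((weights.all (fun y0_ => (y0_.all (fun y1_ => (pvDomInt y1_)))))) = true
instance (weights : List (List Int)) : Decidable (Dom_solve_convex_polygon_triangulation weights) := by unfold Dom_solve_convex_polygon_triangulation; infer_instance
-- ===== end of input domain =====

-- B replaces A's bottom-up length-by-length table filling with top-down memoized recursion
-- over intervals, building the result matrices by comprehensions (objective: alternative).

-- xs[i][j] (exact under Pre_, where every accessed index is in range)
def pvEntry (mm : List (List Int)) (i j : Int) : Int :=
  PySem.List.pyGetD (PySem.List.pyGetD mm i []) j 0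

-- mm[i][j] = v (exact under Pre_)
def pvSet2 (mm : List (List Int)) (i j : Int) (v : Int) : List (List Int) :=
  PySem.List.pySetD mm i (PySem.List.pySetD (PySem.List.pyGetD mm i []) j v)

-- A's 'q < m[i][j]' with m[i][j] = float('inf') as none; also B's 'best is None or q < best'
def pvLtBest (q : Int) (best : Option Int) : Bool :=
  match best with
  | none => true
  | some b => decide (q < b)

-- ===== PORT A =====
-- the (i, l) loop body: m[i][j] = inf; for k …; the cell (i, j) is never read inside the
-- k-loop, so its running value is threaded as Option Int (none = inf) and written back at
-- the end; the k-range is nonempty (l ≥ 2), so the none/inf case never reaches the matrix.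
def pvCellA (w : List (List Int)) (ms : List (List Int) × List (List Int)) (i l : Int) :
    List (List Int) × List (List Int) :=
  let j := i + l
  let st :=
    (PySem.List.pyRange (i + 1) j 1).foldl
      (fun (st : Option Int × Int) k =>
        let q := pvEntry ms.1 i k + pvEntry ms.1 k j + pvEntry w i k +
          pvEntry w k j + pvEntry w i j
        if pvLtBest q st.1 then (some q, k) else st)
      (none, pvEntry ms.2 i j)
  (pvSet2 ms.1 i j (st.1.getD 0), pvSet2 ms.2 i j st.2)

def solve_convex_polygon_triangulation (weights : List (List Int)) : List (List Int) × List (List Int) :=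
  let n := weights.length
  let m0 : List (List Int) := List.replicate n (List.replicate n 0)
  let s0 : List (List Int) := List.replicate n (List.replicate n 0)
  (PySem.List.pyRange 2 (n : Int) 1).foldl
    (fun ms l =>
      (PySem.List.pyRange 0 ((n : Int) - l) 1).foldl
        (fun ms i => pvCellA weights ms i l) ms)
    (m0, s0)

-- ===== PORT B =====
-- Source B's rec(i, j): the memo dict is a pure cache of this recursion (each (i, j) is
-- computed once from the same subcalls), so rec is ported as the recursion itself.
def pvRec (weights : List (List Int)) (i j : Int) : Int × Int :=
  if j - i < 2 then (0, 0)
  else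
    let st :=
      (PySem.List.pyRange (i + 1) j 1).attach.foldl
        (fun (st : Option Int × Int) k =>
          let q := (pvRec weights i k.1).1 + (pvRec weights k.1 j).1 + pvEntry weights i k.1 +
            pvEntry weights k.1 j + pvEntry weights i j
          if pvLtBest q st.1 then (some q, k.1) else st)
        (none, 0)
    (st.1.getD 0, st.2)
termination_by (j - i).toNat
decreasing_by
  · rcases PySem.List.mem_pyRange_one.mp k.2 with ⟨h1, h2⟩
    omega
  · rcases PySem.List.mem_pyRange_one.mp k.2 with ⟨h1, h2⟩
    omega

def solve_convex_polygon_triangulation_alt (weights : List (List Int)) : List (List Int) × List (List Int) :=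
  let n := weights.length
  ((PySem.List.pyRange 0 (n : Int) 1).map (fun i =>
      (PySem.List.pyRange 0 (n : Int) 1).map (fun j => (pvRec weights i j).1)),
   (PySem.List.pyRange 0 (n : Int) 1).map (fun i =>
      (PySem.List.pyRange 0 (n : Int) 1).map (fun j => (pvRec weights i j).2)))

-- ===== PRECONDITION & SPEC =====
-- exactly the inputs where Python A returns: with n ≥ 3 rows 0..n-2 are indexed up to
-- column n-1 (row n-1 never is), so each of them must have length ≥ n; with n < 3 no
-- indexing happens at all and A returns zero matrices for any row shapes.
def Pre_solve_convex_polygon_triangulation (weights : List (List Int)) : Prop :=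
  weights.length < 3 ∨
    ∀ r ∈ List.range (weights.length - 1), weights.length ≤ (weights.getD r []).length
instance (weights : List (List Int)) : Decidable (Pre_solve_convex_polygon_triangulation weights) := by
  unfold Pre_solve_convex_polygon_triangulation; infer_instance

def pvWitness_solve_convex_polygon_triangulation : List (List Int) :=
  [[0, 1, 2], [1, 0, 3], [2, 3, 0]]

def Spec_solve_convex_polygon_triangulation (weights : List (List Int)) (out : List (List Int) × List (List Int)) : Prop := out = solve_convex_polygon_triangulation_alt weights
instance (weights : List (List Int)) (out : List (List Int) × List (List Int)) : Decidable (Spec_solve_convex_polygon_triangulation weights out) := by unfold Spec_solve_convex_polygon_triangulation; infer_instance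

-- ===== CLAIM (what is proved, stated in full; the proofs are below) =====
def Claim_equal_solve_convex_polygon_triangulation : Prop := ∀ (weights : List (List Int)), Dom_solve_convex_polygon_triangulation weights → Pre_solve_convex_polygon_triangulation weights → Spec_solve_convex_polygon_triangulation weights (solve_convex_polygon_triangulation weights)

-- ===== LEMMAS AND PROOFS =====

-- mm is an n×n matrix whose (i, j) entry is f i j
def pvGood (n : Nat) (mm : List (List Int)) (f : Int → Int → Int) : Prop :=
  mm.length = n ∧ (∀ r : Nat, r < n → (mm.getD r []).length = n) ∧
  (∀ i j : Int, 0 ≤ i → i < (n : Int) → 0 ≤ j → j < (n : Int) → pvEntry mm i j = f i j)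

-- entries of A's matrices after rounds 2..L and, in round L, rows 0..I-1
def pvFm (w : List (List Int)) (L I : Int) (sel : Int × Int → Int) : Int → Int → Int :=
  fun i j => if (2 ≤ j - i ∧ j - i < L) ∨ (j - i = L ∧ i < I) then sel (pvRec w i j) else 0

lemma pvRec_small (w : List (List Int)) (i j : Int) (h : j - i < 2) : pvRec w i j = (0, 0) := by
  rw [pvRec]; simp [h]

lemma pvRec_eq (w : List (List Int)) (i j : Int) (h : ¬ j - i < 2) :
    pvRec w i j =
      (let st :=
        (PySem.List.pyRange (i + 1) j 1).foldl
          (fun (st : Option Int × Int) k =>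
            let q := (pvRec w i k).1 + (pvRec w k j).1 + pvEntry w i k +
              pvEntry w k j + pvEntry w i j
            if pvLtBest q st.1 then (some q, k) else st)
          (none, 0)
      (st.1.getD 0, st.2)) := by
  have hfa := List.foldl_attach (l := PySem.List.pyRange (i + 1) j 1)
    (f := fun (st : Option Int × Int) (k : Int) =>
      let q := (pvRec w i k).1 + (pvRec w k j).1 + pvEntry w i k +
        pvEntry w k j + pvEntry w i j
      if pvLtBest q st.1 then (some q, k) else st)
    (b := ((none : Option Int), (0 : Int)))
  rw [pvRec, if_neg h]
  exact congrArg (fun st : Option Int × Int => (st.1.getD 0, st.2)) hfa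

lemma pvGood_congr {n : Nat} {mm : List (List Int)} {f g : Int → Int → Int}
    (h : pvGood n mm f)
    (hfg : ∀ i j : Int, 0 ≤ i → i < (n : Int) → 0 ≤ j → j < (n : Int) → f i j = g i j) :
    pvGood n mm g := by
  refine ⟨h.1, h.2.1, fun i j h1 h2 h3 h4 => ?_⟩
  rw [h.2.2 i j h1 h2 h3 h4, hfg i j h1 h2 h3 h4]

lemma pvGood_replicate (n : Nat) :
    pvGood n (List.replicate n (List.replicate n (0 : Int))) (fun _ _ => 0) := by
  refine ⟨by simp, fun r hr => by rw [List.getD_replicate _ hr, List.length_replicate], ?_⟩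
  intro i j h1 h2 h3 h4
  have hi : i = ((i.toNat : Nat) : Int) := by omega
  have hj : j = ((j.toNat : Nat) : Int) := by omega
  rw [pvEntry, hi, hj, PySem.List.pyGetD_natCast, PySem.List.pyGetD_natCast,
    List.getD_replicate _ (show i.toNat < n by omega),
    List.getD_replicate _ (show j.toNat < n by omega)]

lemma pyGetD_pySetD_int {α : Type} (xs : List α) (a b : Int) (v d : α)
    (h0 : 0 ≤ a) (h1 : a < (xs.length : Int)) (hb : 0 ≤ b) :
    PySem.List.pyGetD (PySem.List.pySetD xs a v) b d =
      if b = a then v else PySem.List.pyGetD xs b d := by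
  have ha : a = ((a.toNat : Nat) : Int) := by omega
  have hb' : b = ((b.toNat : Nat) : Int) := by omega
  rw [ha, hb', PySem.List.pyGetD_pySetD_natCast _ _ _ _ _ (by omega)]
  by_cases h : b.toNat = a.toNat
  · rw [if_pos h, if_pos (show ((b.toNat : Nat) : Int) = ((a.toNat : Nat) : Int) by omega)]
  · rw [if_neg h, if_neg (show ¬ ((b.toNat : Nat) : Int) = ((a.toNat : Nat) : Int) by omega)]

lemma pvSet2_good {n : Nat} {mm : List (List Int)} {f : Int → Int → Int} {a b v : Int}
    (h : pvGood n mm f) (ha0 : 0 ≤ a) (haN : a < (n : Int)) (hb0 : 0 ≤ b) (hbN : b < (n : Int)) :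
    pvGood n (pvSet2 mm a b v) (fun i j => if i = a ∧ j = b then v else f i j) := by
  obtain ⟨hlen, hrows, hent⟩ := h
  have hlen' : a < (mm.length : Int) := by rw [hlen]; exact haN
  have hrowa : (PySem.List.pyGetD mm a []).length = n := by
    have ha : a = ((a.toNat : Nat) : Int) := by omega
    rw [ha, PySem.List.pyGetD_natCast]
    exact hrows a.toNat (by omega)
  refine ⟨by rw [pvSet2, PySem.List.length_pySetD, hlen], ?_, ?_⟩
  · intro r hr
    have : ((r : Nat) : Int) < (mm.length : Int) := by omega
    rw [pvSet2, ← PySem.List.pyGetD_natCast (d := ([] : List Int)),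
      pyGetD_pySetD_int _ _ _ _ _ ha0 hlen' (by omega)]
    by_cases hra : ((r : Nat) : Int) = a
    · rw [if_pos hra, PySem.List.length_pySetD, hrowa]
    · rw [if_neg hra, PySem.List.pyGetD_natCast]
      exact hrows r hr
  · intro i j h1 h2 h3 h4
    show pvEntry (pvSet2 mm a b v) i j = if i = a ∧ j = b then v else f i j
    rw [pvEntry, pvSet2, pyGetD_pySetD_int _ _ _ _ _ ha0 hlen' h1]
    by_cases hia : i = a
    · rw [if_pos hia, pyGetD_pySetD_int _ _ _ _ _ hb0 (by rw [hrowa]; exact hbN) h3]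
      by_cases hjb : j = b
      · rw [if_pos hjb, if_pos (⟨hia, hjb⟩ : i = a ∧ j = b)]
      · rw [if_neg hjb, if_neg (show ¬ (i = a ∧ j = b) from fun hc => hjb hc.2),
          ← hent i j h1 h2 h3 h4, pvEntry, hia]
    · rw [if_neg hia, if_neg (show ¬ (i = a ∧ j = b) from fun hc => hia hc.1),
        ← hent i j h1 h2 h3 h4, pvEntry]

lemma pvCellA_good {w : List (List Int)} {ms : List (List Int) × List (List Int)} {L I : Int}
    (hL : 2 ≤ L) (hI0 : 0 ≤ I) (hIN : I < (w.length : Int) - L)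
    (hm : pvGood w.length ms.1 (pvFm w L I Prod.fst))
    (hs : pvGood w.length ms.2 (pvFm w L I Prod.snd)) :
    pvGood w.length (pvCellA w ms I L).1 (pvFm w L (I + 1) Prod.fst) ∧
      pvGood w.length (pvCellA w ms I L).2 (pvFm w L (I + 1) Prod.snd) := by
  set n := w.length with hn
  have hj0 : (0 : Int) ≤ I + L := by omega
  have hjN : I + L < (n : Int) := by omega
  have hIlt : I < (n : Int) := by omega
  -- the initial value of s[i][j] is 0 (cell not yet processed)
  have hsij : pvEntry ms.2 I (I + L) = 0 := by
    rw [hs.2.2 I (I + L) hI0 hIlt hj0 hjN]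
    simp only [pvFm]
    have : ¬ (((2:Int) ≤ I + L - I ∧ I + L - I < L) ∨ (I + L - I = L ∧ I < I)) := by omega
    rw [if_neg this]
  -- the k-fold over the table equals pvRec's k-fold
  have hfold :
      (PySem.List.pyRange (I + 1) (I + L) 1).foldl
        (fun (st : Option Int × Int) k =>
          let q := pvEntry ms.1 I k + pvEntry ms.1 k (I + L) + pvEntry w I k +
            pvEntry w k (I + L) + pvEntry w I (I + L)
          if pvLtBest q st.1 then (some q, k) else st)
        (none, 0) =
      (PySem.List.pyRange (I + 1) (I + L) 1).foldl
        (fun (st : Option Int × Int) k =>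
          let q := (pvRec w I k).1 + (pvRec w k (I + L)).1 + pvEntry w I k +
            pvEntry w k (I + L) + pvEntry w I (I + L)
          if pvLtBest q st.1 then (some q, k) else st)
        (none, 0) := by
    apply PySem.List.foldl_congr_mem
    intro acc k hk
    rcases PySem.List.mem_pyRange_one.mp hk with ⟨hk1, hk2⟩
    have e1 : pvEntry ms.1 I k = (pvRec w I k).1 := by
      rw [hm.2.2 I k hI0 hIlt (by omega) (by omega)]
      simp only [pvFm]
      by_cases hd : 2 ≤ k - I
      · rw [if_pos (Or.inl ⟨hd, by omega⟩)]
      · have : ¬ (((2:Int) ≤ k - I ∧ k - I < L) ∨ (k - I = L ∧ I < I)) := by omega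
        rw [if_neg this, pvRec_small w I k (by omega)]
    have e2 : pvEntry ms.1 k (I + L) = (pvRec w k (I + L)).1 := by
      rw [hm.2.2 k (I + L) (by omega) (by omega) hj0 hjN]
      simp only [pvFm]
      by_cases hd : 2 ≤ I + L - k
      · rw [if_pos (Or.inl ⟨hd, by omega⟩)]
      · have : ¬ (((2:Int) ≤ I + L - k ∧ I + L - k < L) ∨ (I + L - k = L ∧ k < I)) := by omega
        rw [if_neg this, pvRec_small w k (I + L) (by omega)]
    simp only [e1, e2]
  have hrec := pvRec_eq w I (I + L) (by omega)
  have hcell : pvCellA w ms I L =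
      (pvSet2 ms.1 I (I + L) (pvRec w I (I + L)).1, pvSet2 ms.2 I (I + L) (pvRec w I (I + L)).2) := by
    rw [pvCellA]
    simp only [hsij, hfold, hrec]
  rw [hcell]
  have key : ∀ sel : Int × Int → Int,
      ∀ i j : Int, 0 ≤ i → i < (n : Int) → 0 ≤ j → j < (n : Int) →
      (if i = I ∧ j = I + L then sel (pvRec w I (I + L)) else pvFm w L I sel i j) =
        pvFm w L (I + 1) sel i j := by
    intro sel i j h1 h2 h3 h4
    by_cases hij : i = I ∧ j = I + L
    · rw [if_pos hij]
      simp only [pvFm, hij.1, hij.2]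
      have : ((2:Int) ≤ I + L - I ∧ I + L - I < L) ∨ (I + L - I = L ∧ I < I + 1) := by omega
      rw [if_pos this]
    · rw [if_neg hij]
      simp only [pvFm]
      have : (((2:Int) ≤ j - i ∧ j - i < L) ∨ (j - i = L ∧ i < I)) ↔
          (((2:Int) ≤ j - i ∧ j - i < L) ∨ (j - i = L ∧ i < I + 1)) := by
        constructor <;> intro h
        · rcases h with h | h
          · exact Or.inl h
          · exact Or.inr ⟨h.1, by omega⟩
        · rcases h with h | h
          · exact Or.inl h
          · refine Or.inr ⟨h.1, ?_⟩
            by_contra hcon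
            exact hij ⟨by omega, by omega⟩
      by_cases hc : ((2:Int) ≤ j - i ∧ j - i < L) ∨ (j - i = L ∧ i < I)
      · rw [if_pos hc, if_pos (this.mp hc)]
      · rw [if_neg hc, if_neg (fun hc' => hc (this.mpr hc'))]
  constructor
  · exact pvGood_congr (pvSet2_good hm hI0 hIlt hj0 hjN) (key Prod.fst)
  · exact pvGood_congr (pvSet2_good hs hI0 hIlt hj0 hjN) (key Prod.snd)

lemma pvRow_good (w : List (List Int)) (L : Int) (hL : 2 ≤ L) :
    ∀ (t : Nat), (t : Int) ≤ (w.length : Int) - L →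
    ∀ ms : List (List Int) × List (List Int),
      pvGood w.length ms.1 (pvFm w L 0 Prod.fst) →
      pvGood w.length ms.2 (pvFm w L 0 Prod.snd) →
      pvGood w.length
          ((PySem.List.pyRange 0 (t : Int) 1).foldl (fun ms i => pvCellA w ms i L) ms).1
          (pvFm w L (t : Int) Prod.fst) ∧
        pvGood w.length
          ((PySem.List.pyRange 0 (t : Int) 1).foldl (fun ms i => pvCellA w ms i L) ms).2
          (pvFm w L (t : Int) Prod.snd) := by
  intro t
  induction t with
  | zero =>
    intro _ ms hm hs
    rw [PySem.List.pyRange_one_eq_nil (by omega)]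
    exact ⟨hm, hs⟩
  | succ t ih =>
    intro ht ms hm hs
    have hcast : ((t + 1 : Nat) : Int) = (t : Int) + 1 := by omega
    rw [hcast, PySem.List.pyRange_one_succ_right (by omega), List.foldl_append]
    obtain ⟨ihm, ihs⟩ := ih (by omega) ms hm hs
    simp only [List.foldl_cons, List.foldl_nil]
    have := pvCellA_good hL (Int.natCast_nonneg t) (by omega) ihm ihs
    rw [show ((t : Int) + 1) = (((t + 1 : Nat) : Int))  from by omega] at this
    exact this

lemma pvOuter_good (w : List (List Int)) :
    ∀ (t : Nat), 2 + (t : Int) ≤ (w.length : Int) →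
      pvGood w.length
          ((PySem.List.pyRange 2 (2 + (t : Int)) 1).foldl
            (fun ms l =>
              (PySem.List.pyRange 0 ((w.length : Int) - l) 1).foldl
                (fun ms i => pvCellA w ms i l) ms)
            (List.replicate w.length (List.replicate w.length 0),
             List.replicate w.length (List.replicate w.length 0))).1
          (pvFm w (2 + (t : Int)) 0 Prod.fst) ∧
        pvGood w.length
          ((PySem.List.pyRange 2 (2 + (t : Int)) 1).foldl
            (fun ms l =>
              (PySem.List.pyRange 0 ((w.length : Int) - l) 1).foldl
                (fun ms i => pvCellA w ms i l) ms)
            (List.replicate w.length (List.replicate w.length 0),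
             List.replicate w.length (List.replicate w.length 0))).2
          (pvFm w (2 + (t : Int)) 0 Prod.snd) := by
  intro t
  induction t with
  | zero =>
    intro _
    rw [show ((2 : Int) + ((0 : Nat) : Int)) = 2  from by omega]
    rw [PySem.List.pyRange_one_eq_nil (by omega)]
    have base : ∀ sel : Int × Int → Int, ∀ i j : Int,
        0 ≤ i → i < (w.length : Int) → 0 ≤ j → j < (w.length : Int) →
        (fun _ _ => (0 : Int)) i j = pvFm w 2 0 sel i j := by
      intro sel i j h1 h2 h3 h4
      simp only [pvFm]
      have : ¬ (((2:Int) ≤ j - i ∧ j - i < 2) ∨ (j - i = 2 ∧ i < 0)) := by omega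
      rw [if_neg this]
    exact ⟨pvGood_congr (pvGood_replicate w.length) (base Prod.fst),
      pvGood_congr (pvGood_replicate w.length) (base Prod.snd)⟩
  | succ t ih =>
    intro ht
    set L : Int := 2 + (t : Int) with hLdef
    have hL : 2 ≤ L := by omega
    have hcast : (2 : Int) + ((t + 1 : Nat) : Int) = L + 1 := by push_cast; omega
    rw [hcast, PySem.List.pyRange_one_succ_right (by omega), List.foldl_append]
    obtain ⟨ihm, ihs⟩ := ih (by omega)
    simp only [List.foldl_cons, List.foldl_nil]
    set ms := ((PySem.List.pyRange 2 L 1).foldl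
      (fun ms l =>
        (PySem.List.pyRange 0 ((w.length : Int) - l) 1).foldl
          (fun ms i => pvCellA w ms i l) ms)
      (List.replicate w.length (List.replicate w.length 0),
       List.replicate w.length (List.replicate w.length 0))) with hms
    have htN : ((((w.length : Int) - L).toNat : Nat) : Int) = (w.length : Int) - L := by omega
    have hrow := pvRow_good w L hL ((w.length : Int) - L).toNat (by omega) ms ihm ihs
    rw [htN] at hrow
    have key : ∀ sel : Int × Int → Int, ∀ i j : Int,
        0 ≤ i → i < (w.length : Int) → 0 ≤ j → j < (w.length : Int) →
        pvFm w L ((w.length : Int) - L) sel i j = pvFm w (L + 1) 0 sel i j := by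
      intro sel i j h1 h2 h3 h4
      simp only [pvFm]
      have hiff : (((2:Int) ≤ j - i ∧ j - i < L) ∨ (j - i = L ∧ i < (w.length : Int) - L)) ↔
          (((2:Int) ≤ j - i ∧ j - i < L + 1) ∨ (j - i = L + 1 ∧ i < 0)) := by omega
      by_cases hc : ((2:Int) ≤ j - i ∧ j - i < L) ∨ (j - i = L ∧ i < (w.length : Int) - L)
      · rw [if_pos hc, if_pos (hiff.mp hc)]
      · rw [if_neg hc, if_neg (fun hc' => hc (hiff.mpr hc'))]
    exact ⟨pvGood_congr hrow.1 (key Prod.fst), pvGood_congr hrow.2 (key Prod.snd)⟩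

lemma pvFinal (w : List (List Int)) (sel : Int × Int → Int) (hsel : sel ((0 : Int), (0 : Int)) = 0)
    (M : Int) (hM : (w.length : Int) ≤ M) :
    ∀ i j : Int, 0 ≤ i → i < (w.length : Int) → 0 ≤ j → j < (w.length : Int) →
      pvFm w M 0 sel i j = sel (pvRec w i j) := by
  intro i j h1 h2 h3 h4
  simp only [pvFm]
  by_cases hd : (2:Int) ≤ j - i
  · rw [if_pos (Or.inl ⟨hd, by omega⟩)]
  · have : ¬ (((2:Int) ≤ j - i ∧ j - i < M) ∨ (j - i = M ∧ i < 0)) := by omega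
    rw [if_neg this, pvRec_small w i j (by omega), hsel]

lemma pvA_good (w : List (List Int)) :
    pvGood w.length (solve_convex_polygon_triangulation w).1 (fun i j => (pvRec w i j).1) ∧
      pvGood w.length (solve_convex_polygon_triangulation w).2 (fun i j => (pvRec w i j).2) := by
  by_cases h2 : 2 ≤ w.length
  · have hM : (2 : Int) + ((w.length - 2 : Nat) : Int) = (w.length : Int) := by omega
    have hout := pvOuter_good w (w.length - 2) (by omega)
    rw [hM] at hout
    simp only [solve_convex_polygon_triangulation]
    exact ⟨pvGood_congr hout.1 (pvFinal w Prod.fst rfl _ le_rfl),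
      pvGood_congr hout.2 (pvFinal w Prod.snd rfl _ le_rfl)⟩
  · simp only [solve_convex_polygon_triangulation]
    rw [PySem.List.pyRange_one_eq_nil (by omega)]
    have base : ∀ sel : Int × Int → Int, sel ((0 : Int), (0 : Int)) = 0 →
        ∀ i j : Int, 0 ≤ i → i < (w.length : Int) → 0 ≤ j → j < (w.length : Int) →
        (fun _ _ => (0 : Int)) i j = sel (pvRec w i j) := by
      intro sel hsel i j hi1 hi2 hj1 hj2
      rw [pvRec_small w i j (by omega), hsel]
    exact ⟨pvGood_congr (pvGood_replicate w.length) (base Prod.fst rfl),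
      pvGood_congr (pvGood_replicate w.length) (base Prod.snd rfl)⟩

lemma pvGood_eq_map (n : Nat) (mm : List (List Int)) (f : Int → Int → Int) (h : pvGood n mm f) :
    mm = (PySem.List.pyRange 0 (n : Int) 1).map
      (fun i => (PySem.List.pyRange 0 (n : Int) 1).map (fun j => f i j)) := by
  have hlen : (PySem.List.pyRange 0 (n : Int) 1).length = n := by
    rw [PySem.List.length_pyRange_one]; omega
  have hget : ∀ (xs : List (List Int)) (r : Nat) (hr : r < xs.length), xs.getD r [] = xs[r] := by
    intro xs r hr
    rw [List.getD_eq_getElem?_getD, List.getElem?_eq_getElem hr, Option.getD_some]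
  apply List.ext_getElem (by rw [h.1, List.length_map, hlen])
  intro r h1 h2
  rw [List.getElem_map, PySem.List.getElem_pyRange_one]
  have hrn : r < n := by rw [h.1] at h1; exact h1
  have hrow : mm[r].length = n := by rw [← hget mm r h1]; exact h.2.1 r hrn
  apply List.ext_getElem (by rw [hrow, List.length_map, hlen])
  intro c hc1 hc2
  rw [List.getElem_map, PySem.List.getElem_pyRange_one]
  have hcn : c < n := by rw [hrow] at hc1; exact hc1
  have := h.2.2 r c (by omega) (by omega) (by omega) (by omega)
  rw [pvEntry, PySem.List.pyGetD_natCast, PySem.List.pyGetD_natCast, hget mm r h1] at this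
  rw [List.getD_eq_getElem?_getD, List.getElem?_eq_getElem hc1, Option.getD_some] at this
  rw [show ((0 : Int) + (r : Int)) = ((r : Nat) : Int) from by omega,
    show ((0 : Int) + (c : Int)) = ((c : Nat) : Int) from by omega]
  exact this

-- ===== VERDICT (by name: the statement is the Claim_ definition above) =====
theorem solve_convex_polygon_triangulation_spec : Claim_equal_solve_convex_polygon_triangulation := by
  intro w _ _
  unfold Spec_solve_convex_polygon_triangulation
  obtain ⟨hm, hs⟩ := pvA_good w
  have e1 := pvGood_eq_map w.length _ _ hm
  have e2 := pvGood_eq_map w.length _ _ hs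
  simp only [solve_convex_polygon_triangulation_alt]
  exact Prod.ext e1 e2
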